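-- pv_equiv track=rewrite | github.com/dacacioa/vail-cw-tethis | ui.py | _pick_midi_output_for_ui
-- ===== SOURCE A (Python) =====
-- from typing import Callable, List, Optional
--
-- MIDI_HW_HINTS = ("vail", "summit", "seeed", "xiao")
--
-- MIDI_SOFT_HINTS = ("microsoft gs wavetable", "midi mapper", "software synth", "virtual")
--
-- def _pick_midi_output_for_ui(devices: List[str]) -> str:
--     if not devices:
--         return ""
--
--     def score(name: str) -> int:
--         lower = (name or "").lower()
--         value = 0
--         if any(h in lower for h in MIDI_HW_HINTS):
--             value += 100
--         if any(h in lower for h in MIDI_SOFT_HINTS):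
--             value -= 100
--         return value
--
--     ranked = sorted(devices, key=score, reverse=True)
--     return ranked[0]
-- ===== SOURCE B (Python) =====
-- MIDI_HW_HINTS = ("vail", "summit", "seeed", "xiao")
--
-- MIDI_SOFT_HINTS = ("microsoft gs wavetable", "midi mapper", "software synth", "virtual")
--
-- def _pick_midi_output_for_ui(devices):
--     # Scores can only be 100 (hw hint only), 0 (neither or both), -100 (soft only),
--     # so a single bucket-priority scan replaces the sort: return the first
--     # hardware-only device immediately, else the first neutral one, else the first.
--     if not devices:
--         return ""
--     first_neutral = None
--     for d in devices:
--         low = (d or "").lower()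
--         hw = any(h in low for h in MIDI_HW_HINTS)
--         soft = any(h in low for h in MIDI_SOFT_HINTS)
--         if hw and not soft:
--             return d
--         if hw == soft and first_neutral is None:
--             first_neutral = d
--     return first_neutral if first_neutral is not None else devices[0]
-- ===== Notes on version B (the rewrite author's own statement) =====
-- stated objective: alternative
-- what changed: Since every score is -100, 0 or +100, B replaces the full stable sort plus [0]-indexing with a single bucket-priority scan that returns the first hardware-only device immediately, otherwise remembers the first neutral device, otherwise returns the first device.
import Mathlib
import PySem

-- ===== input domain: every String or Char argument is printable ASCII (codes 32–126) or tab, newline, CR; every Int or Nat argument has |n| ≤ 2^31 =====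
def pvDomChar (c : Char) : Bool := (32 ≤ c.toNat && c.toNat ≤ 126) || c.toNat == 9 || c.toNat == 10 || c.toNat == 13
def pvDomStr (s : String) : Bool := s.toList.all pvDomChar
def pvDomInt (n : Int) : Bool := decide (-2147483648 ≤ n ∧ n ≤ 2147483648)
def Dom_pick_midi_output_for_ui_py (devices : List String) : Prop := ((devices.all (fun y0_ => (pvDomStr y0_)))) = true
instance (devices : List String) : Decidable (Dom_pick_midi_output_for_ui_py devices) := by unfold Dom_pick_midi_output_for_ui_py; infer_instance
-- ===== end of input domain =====

-- B exploits that scores are only -100/0/+100: a single bucket-priority scan (first hw-only device, else first neutral, else first) replaces A's stable sort + [0]; proved equal on all inputs.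


-- ===== PORT A =====
def MIDI_HW_HINTS : List String := ["vail", "summit", "seeed", "xiao"]

def MIDI_SOFT_HINTS : List String := ["microsoft gs wavetable", "midi mapper", "software synth", "virtual"]

-- the inner `score` helper; `(name or "")` is the identity on strings ("" stays "")
def pv_score (name : String) : Int :=
  let lower := PySem.Str.lower name
  let value : Int := 0
  let value := if MIDI_HW_HINTS.any (fun h => PySem.Str.isIn h lower) then value + 100 else value
  let value := if MIDI_SOFT_HINTS.any (fun h => PySem.Str.isIn h lower) then value - 100 else value
  value

def pick_midi_output_for_ui_py (devices : List String) : String :=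
  if devices = [] then ""
  else
    let ranked := PySem.List.sorted devices pv_score true
    ranked.headD ""   -- ranked[0]: ranked is nonempty under the guard, so this equals the Python indexing

-- ===== PORT B =====
-- B's loop body: early return on a hardware-only device, remember the first neutral one
def pvAltScan (ds : List String) (firstNeutral : Option String) (d0 : String) : String :=
  match ds with
  | [] => firstNeutral.getD d0
  | d :: rest =>
    let low := PySem.Str.lower d
    let hw := MIDI_HW_HINTS.any (fun h => PySem.Str.isIn h low)
    let soft := MIDI_SOFT_HINTS.any (fun h => PySem.Str.isIn h low)
    if hw && !soft then d
    else if hw == soft && firstNeutral.isNone then pvAltScan rest (some d) d0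
    else pvAltScan rest firstNeutral d0

def pick_midi_output_for_ui_py_alt (devices : List String) : String :=
  match devices with
  | [] => ""
  | d0 :: _ => pvAltScan devices none d0

-- ===== PRECONDITION & SPEC =====
def Spec_pick_midi_output_for_ui_py (devices : List String) (out : String) : Prop := out = pick_midi_output_for_ui_py_alt devices
instance (devices : List String) (out : String) : Decidable (Spec_pick_midi_output_for_ui_py devices out) := by unfold Spec_pick_midi_output_for_ui_py; infer_instance

-- ===== CLAIM (what is proved, stated in full; the proofs are below) =====
def Claim_equal_pick_midi_output_for_ui_py : Prop := ∀ (devices : List String), Dom_pick_midi_output_for_ui_py devices → Spec_pick_midi_output_for_ui_py devices (pick_midi_output_for_ui_py devices)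

-- ===== LEMMAS AND PROOFS =====

-- the running-max step used as an intermediate description of A's sort head
def pvStep (acc : String × Int) (d : String) : String × Int :=
  let s := pv_score d
  if acc.2 < s then (d, s) else acc

-- head of a stable reverse-insertion: the new element takes the head iff it strictly beats it
theorem insertBy_rev_cons (x y : String) (ys : List String) :
    PySem.List.insertBy (fun a b => decide (pv_score b < pv_score a)) x (y :: ys) =
      if pv_score y < pv_score x then x :: y :: ys
      else y :: PySem.List.insertBy (fun a b => decide (pv_score b < pv_score a)) x ys := by
  simp [PySem.List.insertBy]

-- head of the insertion-sort fold = running strict-max fold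
theorem fold_head_eq (rest : List String) :
    ∀ (y : String) (ys : List String),
      (rest.foldl (fun acc x => PySem.List.insertBy (fun a b => decide (pv_score b < pv_score a)) x acc)
        (y :: ys)).headD "" =
      (rest.foldl pvStep (y, pv_score y)).1 := by
  induction rest with
  | nil => intro y ys; rfl
  | cons x rest ih =>
    intro y ys
    simp only [List.foldl_cons, insertBy_rev_cons, pvStep]
    by_cases h : pv_score y < pv_score x
    · simp only [if_pos h]
      exact ih x (y :: ys)
    · simp only [if_neg h]
      exact ih y _

-- the three buckets: score as a function of the two hint tests
theorem score_buckets (d : String) :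
    pv_score d =
      (if MIDI_HW_HINTS.any (fun h => PySem.Str.isIn h (PySem.Str.lower d)) then (100:Int) else 0)
      + (if MIDI_SOFT_HINTS.any (fun h => PySem.Str.isIn h (PySem.Str.lower d)) then (-100:Int) else 0) := by
  simp only [pv_score]
  split_ifs <;> omega

-- a device of score 100 is never displaced by the running max (scores are ≤ 100)
theorem stay100 (rest : List String) :
    ∀ b : String, pv_score b = 100 → (rest.foldl pvStep (b, pv_score b)).1 = b := by
  induction rest with
  | nil => intro b _; rfl
  | cons x rest ih =>
    intro b hb
    have hx : pv_score x ≤ 100 := by rw [score_buckets]; split_ifs <;> omega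
    simp only [List.foldl_cons, pvStep, hb]
    rw [if_neg (by omega)]
    simpa [hb] using ih b hb

-- invariant: the running max agrees with B's bucket scan under the state correspondence
theorem scan_eq (rest : List String) :
    ∀ (b d0 : String) (fn : Option String),
      (match fn with
       | some x => b = x ∧ pv_score b = 0
       | none => b = d0 ∧ pv_score b = -100) →
      (rest.foldl pvStep (b, pv_score b)).1 = pvAltScan rest fn d0 := by
  induction rest with
  | nil =>
    intro b d0 fn hinv
    cases fn with
    | none => simpa [pvAltScan, Option.getD] using hinv.1
    | some x => simpa [pvAltScan, Option.getD] using hinv.1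
  | cons x rest ih =>
    intro b d0 fn hinv
    have hx := score_buckets x
    have hsb : pv_score b = 0 ∨ pv_score b = -100 := by
      cases fn with
      | none => exact Or.inr hinv.2
      | some y => exact Or.inl hinv.2
    by_cases hw : (MIDI_HW_HINTS.any fun h => PySem.Str.isIn h (PySem.Str.lower x)) = true
    · by_cases soft : (MIDI_SOFT_HINTS.any fun h => PySem.Str.isIn h (PySem.Str.lower x)) = true
      · -- both hints: score 0 (neutral)
        have hsx : pv_score x = 0 := by rw [hx, if_pos hw, if_pos soft]; norm_num
        have hAlt : pvAltScan (x :: rest) fn d0 =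
            if fn.isNone then pvAltScan rest (some x) d0 else pvAltScan rest fn d0 := by
          simp only [pvAltScan]; rw [hw, soft]; simp
        rw [hAlt]
        cases fn with
        | some y =>
          obtain ⟨hb, hs⟩ := hinv
          simp only [List.foldl_cons, pvStep, hs, hsx, Option.isNone_some, if_neg (by omega : ¬(0:Int) < 0), if_neg (by decide : ¬(false = true))]
          simpa [hs] using ih b d0 (some y) ⟨hb, hs⟩
        | none =>
          obtain ⟨hb, hs⟩ := hinv
          simp only [List.foldl_cons, pvStep, hs, hsx, Option.isNone_none, if_pos (by omega : (-100:Int) < 0)]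
          simpa [hsx] using ih x d0 (some x) ⟨rfl, hsx⟩
      · -- hardware only: score 100, B returns early, the running max keeps x
        have hsx : pv_score x = 100 := by rw [hx, if_pos hw, if_neg soft]; norm_num
        have hAlt : pvAltScan (x :: rest) fn d0 = x := by
          have soft' : (MIDI_SOFT_HINTS.any fun h => PySem.Str.isIn h (PySem.Str.lower x)) = false := by
            simpa using soft
          simp only [pvAltScan]; rw [hw, soft']; simp
        rw [hAlt]
        have hlt : pv_score b < pv_score x := by omega
        simp only [List.foldl_cons, pvStep, if_pos hlt]
        simpa [hsx] using stay100 rest x hsx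
    · by_cases soft : (MIDI_SOFT_HINTS.any fun h => PySem.Str.isIn h (PySem.Str.lower x)) = true
      · -- software only: score -100, both skip x
        have hsx : pv_score x = -100 := by rw [hx, if_neg hw, if_pos soft]; norm_num
        have hAlt : pvAltScan (x :: rest) fn d0 = pvAltScan rest fn d0 := by
          have hw' : (MIDI_HW_HINTS.any fun h => PySem.Str.isIn h (PySem.Str.lower x)) = false := by
            simpa using hw
          simp only [pvAltScan]; rw [hw', soft]; simp
        rw [hAlt]
        have hnlt : ¬ pv_score b < pv_score x := by omega
        simp only [List.foldl_cons, pvStep, if_neg hnlt]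
        exact ih b d0 fn hinv
      · -- neither hint: score 0 (neutral)
        have hsx : pv_score x = 0 := by rw [hx, if_neg hw, if_neg soft]; norm_num
        have hAlt : pvAltScan (x :: rest) fn d0 =
            if fn.isNone then pvAltScan rest (some x) d0 else pvAltScan rest fn d0 := by
          have hw' : (MIDI_HW_HINTS.any fun h => PySem.Str.isIn h (PySem.Str.lower x)) = false := by
            simpa using hw
          have soft' : (MIDI_SOFT_HINTS.any fun h => PySem.Str.isIn h (PySem.Str.lower x)) = false := by
            simpa using soft
          simp only [pvAltScan]; rw [hw', soft']; simp
        rw [hAlt]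
        cases fn with
        | some y =>
          obtain ⟨hb, hs⟩ := hinv
          simp only [List.foldl_cons, pvStep, hs, hsx, Option.isNone_some, if_neg (by omega : ¬(0:Int) < 0), if_neg (by decide : ¬(false = true))]
          simpa [hs] using ih b d0 (some y) ⟨hb, hs⟩
        | none =>
          obtain ⟨hb, hs⟩ := hinv
          simp only [List.foldl_cons, pvStep, hs, hsx, Option.isNone_none, if_pos (by omega : (-100:Int) < 0)]
          simpa [hsx] using ih x d0 (some x) ⟨rfl, hsx⟩

-- ===== VERDICT (by name: the statement is the Claim_ definition above) =====
theorem pick_midi_output_for_ui_py_spec : Claim_equal_pick_midi_output_for_ui_py := by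
  intro devices _
  unfold Spec_pick_midi_output_for_ui_py pick_midi_output_for_ui_py pick_midi_output_for_ui_py_alt
  match devices with
  | [] => rfl
  | d0 :: rest =>
    simp only [if_neg (List.cons_ne_nil d0 rest)]
    rw [PySem.List.sorted_rev_eq_foldl_insertBy]
    have hA : (List.foldl (fun acc x => PySem.List.insertBy (fun a b => decide (pv_score b < pv_score a)) x acc) [] (d0 :: rest)).headD "" = (rest.foldl pvStep (d0, pv_score d0)).1 := by
      simpa [PySem.List.insertBy] using fold_head_eq rest d0 []
    rw [hA]
    have hx := score_buckets d0
    by_cases hw : (MIDI_HW_HINTS.any fun h => PySem.Str.isIn h (PySem.Str.lower d0)) = true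
    · by_cases soft : (MIDI_SOFT_HINTS.any fun h => PySem.Str.isIn h (PySem.Str.lower d0)) = true
      · have hsx : pv_score d0 = 0 := by rw [hx, if_pos hw, if_pos soft]; norm_num
        have hAlt : pvAltScan (d0 :: rest) none d0 = pvAltScan rest (some d0) d0 := by
          simp only [pvAltScan]; rw [hw, soft]; simp
        rw [hAlt]
        exact scan_eq rest d0 d0 (some d0) ⟨rfl, hsx⟩
      · have hsx : pv_score d0 = 100 := by rw [hx, if_pos hw, if_neg soft]; norm_num
        have hAlt : pvAltScan (d0 :: rest) none d0 = d0 := by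
          have soft' : (MIDI_SOFT_HINTS.any fun h => PySem.Str.isIn h (PySem.Str.lower d0)) = false := by
            simpa using soft
          simp only [pvAltScan]; rw [hw, soft']; simp
        rw [hAlt]
        exact stay100 rest d0 hsx
    · by_cases soft : (MIDI_SOFT_HINTS.any fun h => PySem.Str.isIn h (PySem.Str.lower d0)) = true
      · have hsx : pv_score d0 = -100 := by rw [hx, if_neg hw, if_pos soft]; norm_num
        have hAlt : pvAltScan (d0 :: rest) none d0 = pvAltScan rest none d0 := by
          have hw' : (MIDI_HW_HINTS.any fun h => PySem.Str.isIn h (PySem.Str.lower d0)) = false := by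
            simpa using hw
          simp only [pvAltScan]; rw [hw', soft]; simp
        rw [hAlt]
        exact scan_eq rest d0 d0 none ⟨rfl, hsx⟩
      · have hsx : pv_score d0 = 0 := by rw [hx, if_neg hw, if_neg soft]; norm_num
        have hAlt : pvAltScan (d0 :: rest) none d0 = pvAltScan rest (some d0) d0 := by
          have hw' : (MIDI_HW_HINTS.any fun h => PySem.Str.isIn h (PySem.Str.lower d0)) = false := by
            simpa using hw
          have soft' : (MIDI_SOFT_HINTS.any fun h => PySem.Str.isIn h (PySem.Str.lower d0)) = false := by
            simpa using soft
          simp only [pvAltScan]; rw [hw', soft']; simp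
        rw [hAlt]
        exact scan_eq rest d0 d0 (some d0) ⟨rfl, hsx⟩
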